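-- pv_equiv track=rewrite | github.com/jgm0327/baekjoon | 프로그래머스/lv1/42862. 체육복/체육복.py | solution
-- ===== SOURCE A (Python) =====
-- def solution(n, lost, reserve):
--     reserved_student = dict.fromkeys(reserve, 0)
--     visit = [False] * (n + 1)
--     answer = n - len(lost)
--     lost.sort()
--
--     for student in lost:
--         if reserved_student.get(student) != None:
--             answer += 1
--             reserved_student.pop(student)
--             visit[student] = True
--
--     for lost_student in lost:
--         cur = lost_student
--         prev, next_ = cur - 1, cur + 1
--         if reserved_student.get(prev) != None and not visit[cur]:
--             reserved_student.pop(prev)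
--             answer += 1
--         elif reserved_student.get(next_) != None and not visit[cur]:
--             reserved_student.pop(next_)
--             answer += 1
--     return answer
-- ===== SOURCE B (Python) =====
-- def solution(n, lost, reserve):
--     # Sort-and-merge rewrite: no dict and no visit array. Exact matches are
--     # computed by a two-pointer intersection of the sorted lost list with the
--     # sorted deduplicated reserves (the non-matching spares fall out of the
--     # same merge), and the borrow pass walks the sorted spare list with a
--     # monotone pointer instead of querying s-1 / s+1 in a hash table.
--     # Sorts lost in place, like the original.
--     lost.sort()
--     spares = sorted(set(reserve))
--     matched = []
--     avail = []
--     i = j = 0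
--     while i < len(lost) and j < len(spares):
--         if lost[i] == spares[j]:
--             matched.append(lost[i])
--             i += 1
--             j += 1
--         elif lost[i] < spares[j]:
--             i += 1
--         else:
--             avail.append(spares[j])
--             j += 1
--     avail.extend(spares[j:])
--     answer = n - len(lost) + len(matched)
--     k = j = 0
--     for s in lost:
--         while k < len(matched) and matched[k] < s:
--             k += 1
--         if k < len(matched) and matched[k] == s:
--             continue
--         while j < len(avail) and avail[j] < s - 1:
--             j += 1
--         if j < len(avail) and avail[j] == s - 1:
--             answer += 1
--             j += 1
--         elif j < len(avail) and avail[j] == s + 1: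
--             answer += 1
--             j += 1
--     return answer
-- ===== Notes on version B (the rewrite author's own statement) =====
-- stated objective: alternative
-- what changed: Replaces A's hash-based greedy (dict of reserves, boolean visit array, per-student dict membership probes for s-1/s+1) by a sort-and-merge algorithm: exact matches and the leftover spares are produced by one two-pointer intersection of the sorted lost list with the sorted deduplicated reserves, and the borrow pass advances a monotone pointer along the sorted spare list (correct because a spare once passed is too small for every later lost student), so no dictionary or membership test remains.
-- outside the precondition, e.g. on solution(3, [-1, 3], [3, 0]): A returns 2, B returns 3; on solution(0, [0, 2], [1]): A returns -1, B returns -1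
import Mathlib
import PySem

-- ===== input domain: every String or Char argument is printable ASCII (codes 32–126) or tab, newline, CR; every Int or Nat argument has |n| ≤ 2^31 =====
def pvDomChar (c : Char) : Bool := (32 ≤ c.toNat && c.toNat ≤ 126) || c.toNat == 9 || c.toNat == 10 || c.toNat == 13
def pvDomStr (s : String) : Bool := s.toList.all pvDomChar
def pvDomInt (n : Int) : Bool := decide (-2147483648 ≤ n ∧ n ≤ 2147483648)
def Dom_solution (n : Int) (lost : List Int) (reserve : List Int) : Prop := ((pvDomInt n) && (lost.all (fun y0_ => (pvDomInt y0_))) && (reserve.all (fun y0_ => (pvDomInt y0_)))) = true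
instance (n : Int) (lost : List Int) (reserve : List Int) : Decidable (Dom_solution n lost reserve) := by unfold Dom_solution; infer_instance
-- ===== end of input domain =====

-- B replaces A's hash-based greedy (dict of reserves + boolean visit list, membership probes
-- for s-1/s+1) by a sort-and-merge algorithm: a two-pointer intersection of the sorted lost
-- list with the sorted deduplicated reserves, then a borrow pass moving a monotone pointer
-- along the sorted spare list. Both A and B sort `lost` in place; the equivalence proved is
-- about the return value.

-- ===== PORT A =====
def solAStep1 (st : Int × PySem.Dict Int Int × List Bool) (student : Int) :
    Int × PySem.Dict Int Int × List Bool :=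
  if (st.2.1.get? student).isSome then
    (st.1 + 1, st.2.1.erase student, PySem.List.pySetD st.2.2 student true)
  else st

def solAStep2 (visit : List Bool) (st : Int × PySem.Dict Int Int) (cur : Int) :
    Int × PySem.Dict Int Int :=
  if (st.2.get? (cur - 1)).isSome && !(PySem.List.pyGetD visit cur false) then
    (st.1 + 1, st.2.erase (cur - 1))
  else if (st.2.get? (cur + 1)).isSome && !(PySem.List.pyGetD visit cur false) then
    (st.1 + 1, st.2.erase (cur + 1))
  else st

def solution (n : Int) (lost : List Int) (reserve : List Int) : Int :=
  let reserved0 : PySem.Dict Int Int :=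
    reserve.foldl (fun d r => d.insert r 0) PySem.Dict.empty
  let visit0 : List Bool := List.replicate (n + 1).toNat false
  let sortedLost := PySem.List.sorted lost (fun x => x)
  let s1 := sortedLost.foldl solAStep1 (n - PySem.List.len lost, reserved0, visit0)
  let s2 := sortedLost.foldl (solAStep2 s1.2.2) (s1.1, s1.2.1)
  s2.1

-- ===== PORT B =====
-- the while-loop over indices i, j becomes the obvious recursion on the two list suffixes;
-- the trailing `avail.extend(spares[j:])` is the first base case
def solBInter : List Int → List Int → List Int × List Int
  | [], sp => ([], sp)
  | _ :: _, [] => ([], [])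
  | l :: ls, t :: sp =>
    if l = t then
      let r := solBInter ls sp
      (l :: r.1, r.2)
    else if l < t then solBInter ls (t :: sp)
    else
      let r := solBInter (l :: ls) sp
      (r.1, t :: r.2)
termination_by ls sp => ls.length + sp.length
decreasing_by all_goals (simp only [List.length_cons]; omega)

-- the two pointer-advancing while-loops become dropWhile on the list suffixes
def solBStep (st : Int × List Int × List Int) (s : Int) : Int × List Int × List Int :=
  let m := st.2.1.dropWhile (fun x => decide (x < s))
  if m.head? = some s then (st.1, m, st.2.2)
  else
    let a := st.2.2.dropWhile (fun x => decide (x < s - 1))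
    if a.head? = some (s - 1) then (st.1 + 1, m, a.tail)
    else if a.head? = some (s + 1) then (st.1 + 1, m, a.tail)
    else (st.1, m, a)

def solution_alt (n : Int) (lost : List Int) (reserve : List Int) : Int :=
  -- Source B's lost.sort() mutates `lost` in place only; the sorted list it produces
  let L := PySem.List.sorted lost (fun x => x)
  let spares := PySem.List.sorted (PySem.Set.ofList reserve) (fun x => x)
  let r := solBInter L spares
  let st := L.foldl solBStep (n - PySem.List.len lost + PySem.List.len r.1, r.1, r.2)
  st.1

-- ===== PRECONDITION & SPEC =====
-- Pre_ is a closed-form sufficient condition that A raises no IndexError on its visit list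
-- (a lost entry outside the list's index range is admitted only when neither it nor its
-- neighbours can ever be looked up among the reserves) and that no two distinct lost entries
-- alias the same visit cell (negative-index wraparound, n+1 apart); it is conservative: on
-- some excluded inputs A still returns, and B agrees with A on most of them.
def Pre_solution (n : Int) (lost : List Int) (reserve : List Int) : Prop :=
  (∀ x ∈ lost, (-(n + 1) ≤ x ∧ x ≤ n) ∨ (x ∉ reserve ∧ x - 1 ∉ reserve ∧ x + 1 ∉ reserve))
  ∧ (0 ≤ n → ∀ x ∈ lost, ∀ y ∈ lost, x ≠ y → (x - y) % (n + 1) ≠ 0)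
instance (n : Int) (lost : List Int) (reserve : List Int) : Decidable (Pre_solution n lost reserve) := by
  unfold Pre_solution; infer_instance

def pvWitness_solution : Int × List Int × List Int := (3, [1, 3], [2])

def Spec_solution (n : Int) (lost : List Int) (reserve : List Int) (out : Int) : Prop :=
  out = solution_alt n lost reserve
instance (n : Int) (lost : List Int) (reserve : List Int) (out : Int) : Decidable (Spec_solution n lost reserve out) := by
  unfold Spec_solution; infer_instance

-- ===== CLAIM (what is proved, stated in full; the proofs are below) =====
def Claim_equal_solution : Prop := ∀ (n : Int) (lost : List Int) (reserve : List Int), Dom_solution n lost reserve → Pre_solution n lost reserve → Spec_solution n lost reserve (solution n lost reserve)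

-- ===== LEMMAS AND PROOFS =====

-- proof-only abstraction of the borrow pass: the spare pool as a SET (A's dict keys) --
def pvGStep (matched : PySem.Set Int) (st : Int × PySem.Set Int) (s : Int) :
    Int × PySem.Set Int :=
  if !(matched.contains s) then
    if st.2.contains (s - 1) then (st.1 + 1, PySem.Set.discard st.2 (s - 1))
    else if st.2.contains (s + 1) then (st.1 + 1, PySem.Set.discard st.2 (s + 1))
    else st
  else st

theorem pv_get?_erase (d : PySem.Dict Int Int) (k j : Int) :
    ((d.erase k).get? j) = if j = k then none else d.get? j := by
  obtain ⟨items⟩ := d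
  induction items with
  | nil => simp [PySem.Dict.get?, PySem.Dict.erase]
  | cons p t ih =>
    simp only [PySem.Dict.get?, PySem.Dict.erase, List.filter_cons] at *
    by_cases hpk : p.1 = k <;> by_cases hpj : p.1 = j <;> simp_all

theorem pv_isSome_foldl_insert (l : List Int) :
    ∀ (d : PySem.Dict Int Int) (j : Int),
    ((l.foldl (fun d r => d.insert r 0) d).get? j).isSome
      = ((d.get? j).isSome || decide (j ∈ l)) := by
  induction l with
  | nil => simp
  | cons r t ih =>
    intro d j
    simp only [List.foldl_cons, ih, PySem.Dict.get?_insert]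
    by_cases h : j = r <;> simp [h]

theorem pv_contains_ofList (xs : List Int) (j : Int) :
    PySem.Set.contains (PySem.Set.ofList xs) j = decide (j ∈ xs) := by
  have h : j ∈ PySem.Set.ofList xs ↔ j ∈ xs := PySem.Set.mem_ofList xs j
  simp [PySem.Set.contains, h]

theorem pv_pyIdx?_eq_some_iff (N : Nat) (x : Int) (t : Nat) :
    PySem.List.pyIdx? N x = some t ↔
      ((0 ≤ x ∧ x < (N : Int) ∧ x = (t : Int)) ∨
       (x < 0 ∧ -(N : Int) ≤ x ∧ x + N = (t : Int))) := by
  unfold PySem.List.pyIdx?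
  split_ifs with h1 h2 h3 <;> simp <;> omega

theorem pv_pyIdx?_eq_none_iff (n : Int) (x : Int) :
    PySem.List.pyIdx? (n + 1).toNat x = none ↔ ¬(-(n + 1) ≤ x ∧ x ≤ n) := by
  unfold PySem.List.pyIdx?
  split_ifs with h1 h2 h3 <;> simp <;> omega

theorem pv_getD_pySetD (v : List Bool) (s : Int) (t : Nat) (b : Bool) :
    (PySem.List.pySetD v s b).getD t false
      = if PySem.List.pyIdx? v.length s = some t then b else v.getD t false := by
  unfold PySem.List.pySetD PySem.List.pySet?
  cases h : PySem.List.pyIdx? v.length s with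
  | none => simp
  | some k =>
    have hk : k < v.length := by
      rcases (pv_pyIdx?_eq_some_iff v.length s k).mp h with ⟨_, h2, h3⟩ | ⟨h1, h2, h3⟩ <;> omega
    by_cases hkt : k = t
    · subst hkt
      simp [List.getD_eq_getElem?_getD, hk]
    · simp [hkt, List.getD_eq_getElem?_getD, List.getElem?_set_ne hkt]

theorem pv_contains_discard (sp : PySem.Set Int) (x j : Int) :
    (PySem.Set.discard sp x).contains j = (sp.contains j && !(j == x)) := by
  simp only [PySem.Set.discard, PySem.Set.contains]
  by_cases hjx : j = x
  · subst hjx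
    simp [List.mem_filter]
  · simp [List.mem_filter, hjx]

theorem pv_contains_diff (a b : PySem.Set Int) (j : Int) :
    (PySem.Set.diff a b).contains j = (a.contains j && !(b.contains j)) := by
  simp only [PySem.Set.diff, PySem.Set.contains]
  by_cases hb : List.contains b j <;>
    simp_all [List.mem_filter]

theorem pv_len_ofList (xs : List Int) :
    (PySem.Set.ofList xs).length = xs.toFinset.card := by
  rw [← List.toFinset_card_of_nodup (PySem.Set.nodup_ofList xs)]
  congr 1
  ext z
  simp [PySem.Set.mem_ofList]

theorem pv_ofList_len_cons (s : Int) (ys : List Int) :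
    (PySem.Set.ofList (s :: ys)).length
      = 1 + (PySem.Set.ofList (ys.filter (fun y => !(y == s)))).length := by
  rw [pv_len_ofList, pv_len_ofList]
  have h2 : (ys.filter (fun y => !(y == s))).toFinset = ys.toFinset.erase s := by
    ext z
    simp [Finset.mem_erase, and_comm]
  rw [List.toFinset_cons, h2]
  have : insert s ys.toFinset = insert s (ys.toFinset.erase s) := by
    ext z
    by_cases hz : z = s <;> simp [hz, Finset.mem_erase]
  rw [this, Finset.card_insert_of_notMem (by simp), Nat.add_comm]

-- phase 1: characterisation of A's first loop (general: duplicates, out-of-range values)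
theorem pv_phase1 (L : List Int) :
    ∀ (ans : Int) (d : PySem.Dict Int Int) (v : List Bool),
    (L.foldl solAStep1 (ans, d, v)).1
        = ans + ((PySem.Set.ofList (L.filter (fun s => (d.get? s).isSome))).length : Int)
    ∧ (∀ j : Int, ((L.foldl solAStep1 (ans, d, v)).2.1.get? j).isSome
        = ((d.get? j).isSome && !decide (j ∈ L)))
    ∧ ((L.foldl solAStep1 (ans, d, v)).2.2.length = v.length)
    ∧ (∀ t : Nat, (L.foldl solAStep1 (ans, d, v)).2.2.getD t false
        = (v.getD t false
            || L.any (fun s => (d.get? s).isSome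
                && decide (PySem.List.pyIdx? v.length s = some t)))) := by
  induction L with
  | nil => intro ans d v; simp
  | cons s T ih =>
    intro ans d v
    simp only [List.foldl_cons]
    by_cases hd : (d.get? s).isSome
    · rw [show solAStep1 (ans, d, v) s
          = (ans + 1, d.erase s, PySem.List.pySetD v s true) by simp [solAStep1, hd]]
      obtain ⟨h1, h2, h3, h4⟩ := ih (ans + 1) (d.erase s) (PySem.List.pySetD v s true)
      have hlen : (PySem.List.pySetD v s true).length = v.length :=
        PySem.List.length_pySetD v s true
      refine ⟨?_, ?_, by rw [h3, hlen], ?_⟩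
      · rw [h1, List.filter_cons_of_pos (by simpa using hd)]
        rw [pv_ofList_len_cons]
        have : T.filter (fun x => ((d.erase s).get? x).isSome)
            = (T.filter (fun x => (d.get? x).isSome)).filter (fun y => !(y == s)) := by
          rw [List.filter_filter]
          apply List.filter_congr
          intro x _
          rw [pv_get?_erase]
          by_cases hxs : x = s <;> simp [hxs]
        rw [this]
        push_cast
        ring
      · intro j
        rw [h2 j, pv_get?_erase]
        by_cases hjs : j = s <;> simp [hjs, hd]
      · intro t
        rw [h4 t, hlen, pv_getD_pySetD]
        by_cases hidx : PySem.List.pyIdx? v.length s = some t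
        · simp [hidx, hd]
        · have hdec : decide (PySem.List.pyIdx? v.length s = some t) = false := by
            simp [hidx]
          simp only [if_neg hidx, List.any_cons, hd, hdec, Bool.and_false,
            Bool.false_or]
          congr 1
          apply PySem.List.any_congr_mem
          intro x _
          rw [pv_get?_erase]
          by_cases hxs : x = s <;> simp [hxs, hdec]
    · rw [show solAStep1 (ans, d, v) s = (ans, d, v) by simp [solAStep1, hd]]
      obtain ⟨h1, h2, h3, h4⟩ := ih ans d v
      refine ⟨?_, ?_, h3, ?_⟩
      · rw [h1, List.filter_cons_of_neg (by simpa using hd)]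
      · intro j
        rw [h2 j]
        by_cases hjs : j = s <;> simp [hjs, hd]
      · intro t
        rw [h4 t]
        simp [hd]

-- phase 2: A's borrow loop with the dict and the visit list tracks the set-level greedy
theorem pv_phase2 (v1 : List Bool) (matched : PySem.Set Int) :
    ∀ (L : List Int) (ans : Int) (d : PySem.Dict Int Int) (sp : PySem.Set Int),
    (∀ s ∈ L, PySem.List.pyGetD v1 s false = matched.contains s) →
    (∀ j : Int, (d.get? j).isSome = PySem.Set.contains sp j) →
    (L.foldl (solAStep2 v1) (ans, d)).1 = (L.foldl (pvGStep matched) (ans, sp)).1 := by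
  intro L
  induction L with
  | nil => intro ans d sp _ _; simp
  | cons s T ih =>
    intro ans d sp hvis hrel
    simp only [List.foldl_cons]
    have hv := hvis s (by simp)
    have hrest : ∀ s' ∈ T, PySem.List.pyGetD v1 s' false = matched.contains s' :=
      fun s' hs' => hvis s' (by simp [hs'])
    by_cases hm : matched.contains s
    · have hvv : PySem.List.pyGetD v1 s false = true := by rw [hv]; exact hm
      rw [show solAStep2 v1 (ans, d) s = (ans, d) by
        simp [solAStep2, hvv]]
      have hmm : s ∈ matched := by simpa [PySem.Set.contains] using hm
      rw [show pvGStep matched (ans, sp) s = (ans, sp) by simp [pvGStep, hmm]]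
      exact ih ans d sp hrest hrel
    · have hm' : matched.contains s = false := by simpa using hm
      have hvv : PySem.List.pyGetD v1 s false = false := by rw [hv]; exact hm'
      have hnm : s ∉ matched := by simpa [PySem.Set.contains] using hm'
      by_cases hc1 : PySem.Set.contains sp (s - 1)
      · have hc1m : s - 1 ∈ sp := by simpa [PySem.Set.contains] using hc1
        rw [show solAStep2 v1 (ans, d) s = (ans + 1, d.erase (s - 1)) by
          simp [solAStep2, hvv, hrel (s - 1), hc1m]]
        rw [show pvGStep matched (ans, sp) s = (ans + 1, PySem.Set.discard sp (s - 1)) by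
          simp [pvGStep, hnm, hc1m]]
        apply ih _ _ _ hrest
        intro j
        rw [pv_get?_erase, pv_contains_discard]
        by_cases hj : j = s - 1 <;> simp [hj, hrel j]
      · have hc1' : PySem.Set.contains sp (s - 1) = false := by simpa using hc1
        have hc1m : s - 1 ∉ sp := by simpa [PySem.Set.contains] using hc1'
        by_cases hc2 : PySem.Set.contains sp (s + 1)
        · have hc2m : s + 1 ∈ sp := by simpa [PySem.Set.contains] using hc2
          rw [show solAStep2 v1 (ans, d) s = (ans + 1, d.erase (s + 1)) by
            simp [solAStep2, hvv, hrel (s - 1), hrel (s + 1), hc1m, hc2m]]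
          rw [show pvGStep matched (ans, sp) s
              = (ans + 1, PySem.Set.discard sp (s + 1)) by simp [pvGStep, hnm, hc1m, hc2m]]
          apply ih _ _ _ hrest
          intro j
          rw [pv_get?_erase, pv_contains_discard]
          by_cases hj : j = s + 1 <;> simp [hj, hrel j]
        · have hc2' : PySem.Set.contains sp (s + 1) = false := by simpa using hc2
          have hc2m : s + 1 ∉ sp := by simpa [PySem.Set.contains] using hc2'
          rw [show solAStep2 v1 (ans, d) s = (ans, d) by
            simp [solAStep2, hvv, hrel (s - 1), hrel (s + 1), hc1m, hc2m]]
          rw [show pvGStep matched (ans, sp) s = (ans, sp) by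
            simp [pvGStep, hnm, hc1m, hc2m]]
          exact ih ans d sp hrest hrel

theorem pv_getD_replicate_false (m t : Nat) :
    (List.replicate m false).getD t false = false := by
  simp [List.getD]

-- membership in Set.discard
theorem pv_mem_discard (sp : PySem.Set Int) (y x : Int) :
    x ∈ PySem.Set.discard sp y ↔ x ∈ sp ∧ x ≠ y := by
  simp [PySem.Set.discard, List.mem_filter]

-- dropWhile (< c) on a strictly sorted list is filter (c ≤ .)
theorem pv_dropWhile_sorted (c : Int) :
    ∀ (l : List Int), l.Pairwise (· < ·) →
    l.dropWhile (fun x => decide (x < c)) = l.filter (fun x => decide (c ≤ x)) := by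
  intro l
  induction l with
  | nil => simp
  | cons a t ih =>
    intro h
    by_cases ha : a < c
    · rw [List.dropWhile_cons_of_pos (by simpa using ha),
        List.filter_cons_of_neg (by simpa using (by omega : ¬ c ≤ a))]
      exact ih h.of_cons
    · rw [List.dropWhile_cons_of_neg (by simpa using ha),
        List.filter_cons_of_pos (by simpa using (by omega : c ≤ a))]
      have : t.filter (fun x => decide (c ≤ x)) = t := by
        apply List.filter_eq_self.mpr
        intro x hx
        have := (List.pairwise_cons.mp h).1 x hx
        simp
        omega
      rw [this]

theorem pv_head_filter_ge (c : Int) :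
    ∀ (l : List Int), l.Pairwise (· < ·) →
    ((l.filter (fun x => decide (c ≤ x))).head? = some c ↔ c ∈ l) := by
  intro l
  induction l with
  | nil => simp
  | cons a t ih =>
    intro h
    by_cases ha : c ≤ a
    · rw [List.filter_cons_of_pos (by simpa using ha)]
      simp only [List.head?_cons, Option.some.injEq, List.mem_cons]
      constructor
      · intro he
        exact Or.inl he.symm
      · rintro (rfl | hct)
        · rfl
        · have := (List.pairwise_cons.mp h).1 c hct
          omega
    · rw [List.filter_cons_of_neg (by simpa using ha)]
      rw [ih h.of_cons]
      simp [List.mem_cons]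
      intro he
      omega

-- the two-pointer intersection of a sorted (≤) list with a strictly sorted list is
-- exactly the pair of filters (common spares, non-common spares)
theorem pv_inter_aux :
    ∀ (k : Nat) (L S : List Int), L.length + S.length ≤ k →
    L.Pairwise (· ≤ ·) → S.Pairwise (· < ·) →
    solBInter L S = (S.filter (fun t => decide (t ∈ L)), S.filter (fun t => !decide (t ∈ L))) := by
  intro k
  induction k with
  | zero =>
    intro L S hk hL hS
    have h1 : L = [] := by cases L <;> simp_all
    have h2 : S = [] := by cases S <;> simp_all
    subst h1; subst h2
    simp [solBInter]
  | succ k ih =>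
    intro L S hk hL hS
    match L, S with
    | [], sp =>
      simp [solBInter]
    | l :: ls, [] =>
      simp [solBInter]
    | l :: ls, t :: sp =>
      have hlsle : ∀ x ∈ ls, l ≤ x := fun x hx => (List.pairwise_cons.mp hL).1 x hx
      have hsplt : ∀ x ∈ sp, t < x := fun x hx => (List.pairwise_cons.mp hS).1 x hx
      rw [solBInter]
      by_cases hlt : l = t
      · rw [if_pos hlt]
        rw [ih ls sp (by simp at hk; omega) hL.of_cons hS.of_cons]
        subst hlt
        have hm1 : sp.filter (fun x => decide (x ∈ l :: ls)) = sp.filter (fun x => decide (x ∈ ls)) := by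
          apply List.filter_congr
          intro x hx
          have := hsplt x hx
          simp [List.mem_cons]
          omega
        have hm2 : sp.filter (fun x => !decide (x ∈ l :: ls)) = sp.filter (fun x => !decide (x ∈ ls)) := by
          apply List.filter_congr
          intro x hx
          have := hsplt x hx
          simp [List.mem_cons]
          omega
        rw [List.filter_cons_of_pos (by simp), List.filter_cons_of_neg (by simp), hm1, hm2]
      · rw [if_neg hlt]
        by_cases hlt2 : l < t
        · rw [if_pos hlt2]
          rw [ih ls (t :: sp) (by simp at hk ⊢; omega) hL.of_cons hS]
          have hne : ∀ x ∈ t :: sp, x ≠ l := by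
            intro x hx
            have hx' : t ≤ x := by
              rcases List.mem_cons.mp hx with rfl | hx2
              · omega
              · have := hsplt x hx2; omega
            omega
          have h1 : (t :: sp).filter (fun x => decide (x ∈ l :: ls))
              = (t :: sp).filter (fun x => decide (x ∈ ls)) := by
            apply List.filter_congr
            intro x hx
            simp [List.mem_cons, hne x hx]
          have h2 : (t :: sp).filter (fun x => !decide (x ∈ l :: ls))
              = (t :: sp).filter (fun x => !decide (x ∈ ls)) := by
            apply List.filter_congr
            intro x hx
            simp [List.mem_cons, hne x hx]
          rw [h1, h2]
        · rw [if_neg hlt2]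
          have htl : t < l := by omega
          rw [ih (l :: ls) sp (by simp at hk ⊢; omega) hL hS.of_cons]
          have htn : t ∉ l :: ls := by
            intro hmem
            rcases List.mem_cons.mp hmem with rfl | h2
            · omega
            · have := hlsle t h2; omega
          rw [List.filter_cons_of_neg (by simpa using htn), List.filter_cons_of_pos (by simpa using htn)]

theorem pv_inter_spec (L S : List Int) (hL : L.Pairwise (· ≤ ·)) (hS : S.Pairwise (· < ·)) :
    solBInter L S = (S.filter (fun t => decide (t ∈ L)), S.filter (fun t => !decide (t ∈ L))) :=
  pv_inter_aux (L.length + S.length) L S le_rfl hL hS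

-- phase 3: the pointer walk over the sorted matched/avail lists computes the set-level greedy
theorem pv_phase3 (ms : PySem.Set Int) :
    ∀ (L : List Int) (ans : Int) (ml al : List Int) (aset : PySem.Set Int),
    L.Pairwise (· ≤ ·) → ml.Pairwise (· < ·) → al.Pairwise (· < ·) →
    (∀ x ∈ ml, x ∈ ms) → (∀ x ∈ ms, x ∈ ml ∨ ∀ s ∈ L, x < s) →
    (∀ x ∈ al, x ∈ aset) → (∀ x ∈ aset, x ∈ al ∨ ∀ s ∈ L, x < s - 1) →
    (∀ s ∈ L, s ∉ aset) →
    (L.foldl solBStep (ans, ml, al)).1 = (L.foldl (pvGStep ms) (ans, aset)).1 := by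
  intro L
  induction L with
  | nil => intros; simp
  | cons s T ih =>
    intro ans ml al aset hL hml hal hmsub hmsup hasub hasup hnot
    have hsT : ∀ s' ∈ T, s ≤ s' := fun s' h => (List.pairwise_cons.mp hL).1 s' h
    have hLT : T.Pairwise (· ≤ ·) := (List.pairwise_cons.mp hL).2
    simp only [List.foldl_cons]
    obtain ⟨m, hmdef⟩ : ∃ m, m = ml.dropWhile (fun x => decide (x < s)) := ⟨_, rfl⟩
    have hmfil : m = ml.filter (fun x => decide (s ≤ x)) := by
      rw [hmdef]; exact pv_dropWhile_sorted s ml hml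
    have hmpw : List.Pairwise (· < ·) m := by rw [hmfil]; exact hml.filter _
    have hmm : ∀ x ∈ m, x ∈ ml := by
      rw [hmfil]; intro x hx; exact (List.mem_filter.mp hx).1
    have hmsub' : ∀ x ∈ m, x ∈ ms := fun x hx => hmsub x (hmm x hx)
    have hmsup' : ∀ x ∈ ms, x ∈ m ∨ ∀ s' ∈ T, x < s' := by
      intro x hx
      rcases hmsup x hx with hxm | hlt
      · by_cases hxs : s ≤ x
        · left; rw [hmfil]; exact List.mem_filter.mpr ⟨hxm, by simpa using hxs⟩
        · right; intro s' hs'; have := hsT s' hs'; omega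
      · right; intro s' hs'; exact hlt s' (by simp [hs'])
    have hmhead : (m.head? = some s) ↔ s ∈ ms := by
      rw [hmfil, pv_head_filter_ge s ml hml]
      constructor
      · exact hmsub s
      · intro h
        rcases hmsup s h with h1 | h2
        · exact h1
        · exact absurd (h2 s (by simp)) (lt_irrefl s)
    by_cases hsm : s ∈ ms
    · have hstep : solBStep (ans, ml, al) s = (ans, m, al) := by
        simp only [solBStep]
        rw [← hmdef, if_pos (hmhead.mpr hsm)]
      rw [hstep, show pvGStep ms (ans, aset) s = (ans, aset) by simp [pvGStep, hsm]]
      exact ih ans m al aset hLT hmpw hal hmsub' hmsup' hasub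
        (fun x hx => (hasup x hx).imp id (fun h s' hs' => h s' (by simp [hs'])))
        (fun s' hs' => hnot s' (by simp [hs']))
    · have hheadne : ¬ (m.head? = some s) := fun h => hsm (hmhead.mp h)
      obtain ⟨a, hadef⟩ : ∃ a, a = al.dropWhile (fun x => decide (x < s - 1)) := ⟨_, rfl⟩
      have hafil : a = al.filter (fun x => decide (s - 1 ≤ x)) := by
        rw [hadef]; exact pv_dropWhile_sorted (s - 1) al hal
      have hapw : List.Pairwise (· < ·) a := by rw [hafil]; exact hal.filter _
      have ham : ∀ x ∈ a, x ∈ al := by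
        rw [hafil]; intro x hx; exact (List.mem_filter.mp hx).1
      have hage : ∀ x ∈ a, s - 1 ≤ x := by
        rw [hafil]; intro x hx
        have := (List.mem_filter.mp hx).2; simpa using this
      have hamem : ∀ x, x ∈ al → s - 1 ≤ x → x ∈ a := by
        intro x h1 h2
        rw [hafil]; exact List.mem_filter.mpr ⟨h1, by simpa using h2⟩
      have hahead1 : (a.head? = some (s - 1)) ↔ (s - 1) ∈ al := by
        rw [hafil]; exact pv_head_filter_ge (s - 1) al hal
      have hs1iff : (s - 1) ∈ al ↔ (s - 1) ∈ aset := by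
        constructor
        · exact hasub _
        · intro hx
          rcases hasup _ hx with h | h
          · exact h
          · have := h s (by simp); omega
      have hs2iff : (s + 1) ∈ al ↔ (s + 1) ∈ aset := by
        constructor
        · exact hasub _
        · intro hx
          rcases hasup _ hx with h | h
          · exact h
          · have := h s (by simp); omega
      by_cases hc1 : (s - 1) ∈ aset
      · have hh : a.head? = some (s - 1) := hahead1.mpr (hs1iff.mpr hc1)
        obtain ⟨t', hta⟩ : ∃ t', a = (s - 1) :: t' := by
          cases ha' : a with
          | nil => rw [ha'] at hh; simp at hh
          | cons h0 t0 =>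
            rw [ha'] at hh
            simp at hh
            exact ⟨t0, by rw [hh]⟩
        have hstep : solBStep (ans, ml, al) s = (ans + 1, m, t') := by
          simp only [solBStep]
          rw [← hmdef, if_neg hheadne, ← hadef, if_pos hh, hta, List.tail_cons]
        rw [hstep, show pvGStep ms (ans, aset) s = (ans + 1, PySem.Set.discard aset (s - 1)) by
          simp [pvGStep, hsm, hc1]]
        have hcons := List.pairwise_cons.mp (by rw [← hta]; exact hapw :
          List.Pairwise (· < ·) ((s - 1) :: t'))
        apply ih _ _ _ _ hLT hmpw hcons.2 hmsub' hmsup'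
        · intro x hx
          refine (pv_mem_discard _ _ _).mpr ⟨hasub x (ham x (by rw [hta]; exact List.mem_cons_of_mem _ hx)), ?_⟩
          have := hcons.1 x hx; omega
        · intro x hx
          obtain ⟨hxa, hxne⟩ := (pv_mem_discard _ _ _).mp hx
          rcases hasup x hxa with h | h
          · by_cases hge : s - 1 ≤ x
            · left
              have hxina : x ∈ a := hamem x h hge
              rw [hta] at hxina
              rcases List.mem_cons.mp hxina with h1 | h1
              · exact absurd h1 hxne
              · exact h1
            · right; intro s' hs'; have := hsT s' hs'; omega
          · right; intro s' hs'; exact h s' (by simp [hs'])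
        · intro s' hs' hmem
          exact hnot s' (by simp [hs']) ((pv_mem_discard _ _ _).mp hmem).1
      · have hh1 : ¬ (a.head? = some (s - 1)) := fun h => hc1 (hs1iff.mp (hahead1.mp h))
        by_cases hc2 : (s + 1) ∈ aset
        · have hmem_a : (s + 1) ∈ a := hamem _ (hs2iff.mpr hc2) (by omega)
          obtain ⟨t', hta⟩ : ∃ t', a = (s + 1) :: t' := by
            cases ha' : a with
            | nil => rw [ha'] at hmem_a; simp at hmem_a
            | cons h0 t0 =>
              refine ⟨t0, ?_⟩
              have hh0a : h0 ∈ a := by rw [ha']; simp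
              have h0ge : s - 1 ≤ h0 := hage h0 hh0a
              have h0ne1 : h0 ≠ s - 1 := by
                intro he
                exact hh1 (by rw [ha', he]; rfl)
              have h0nes : h0 ≠ s := by
                intro he
                exact hnot s (by simp) (he ▸ hasub h0 (ham h0 hh0a))
              have h0le : h0 ≤ s + 1 := by
                rw [ha'] at hmem_a
                rcases List.mem_cons.mp hmem_a with h1 | h1
                · omega
                · have hpw0 : List.Pairwise (· < ·) (h0 :: t0) := by rw [← ha']; exact hapw
                  have := (List.pairwise_cons.mp hpw0).1 _ h1; omega
              have : h0 = s + 1 := by omega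
              rw [this]
          have hh : a.head? = some (s + 1) := by rw [hta]; rfl
          have hstep : solBStep (ans, ml, al) s = (ans + 1, m, t') := by
            simp only [solBStep]
            rw [← hmdef, if_neg hheadne, ← hadef, if_neg hh1, if_pos hh, hta, List.tail_cons]
          rw [hstep, show pvGStep ms (ans, aset) s = (ans + 1, PySem.Set.discard aset (s + 1)) by
            simp [pvGStep, hsm, hc1, hc2]]
          have hcons := List.pairwise_cons.mp (by rw [← hta]; exact hapw :
            List.Pairwise (· < ·) ((s + 1) :: t'))
          apply ih _ _ _ _ hLT hmpw hcons.2 hmsub' hmsup'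
          · intro x hx
            refine (pv_mem_discard _ _ _).mpr ⟨hasub x (ham x (by rw [hta]; exact List.mem_cons_of_mem _ hx)), ?_⟩
            have := hcons.1 x hx; omega
          · intro x hx
            obtain ⟨hxa, hxne⟩ := (pv_mem_discard _ _ _).mp hx
            rcases hasup x hxa with h | h
            · by_cases hge : s - 1 ≤ x
              · left
                have hxina : x ∈ a := hamem x h hge
                rw [hta] at hxina
                rcases List.mem_cons.mp hxina with h1 | h1
                · exact absurd h1 hxne
                · exact h1
              · right; intro s' hs'; have := hsT s' hs'; omega
            · right; intro s' hs'; exact h s' (by simp [hs'])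
          · intro s' hs' hmem
            exact hnot s' (by simp [hs']) ((pv_mem_discard _ _ _).mp hmem).1
        · have hh2 : ¬ (a.head? = some (s + 1)) := by
            intro h
            obtain ⟨t', hta⟩ : ∃ t', a = (s + 1) :: t' := by
              cases ha' : a with
              | nil => rw [ha'] at h; simp at h
              | cons h0 t0 =>
                rw [ha'] at h; simp at h
                exact ⟨t0, by rw [h]⟩
            have : (s + 1) ∈ al := ham (s + 1) (by rw [hta]; simp)
            exact hc2 (hs2iff.mp this)
          have hstep : solBStep (ans, ml, al) s = (ans, m, a) := by
            simp only [solBStep]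
            rw [← hmdef, if_neg hheadne, ← hadef, if_neg hh1, if_neg hh2]
          rw [hstep, show pvGStep ms (ans, aset) s = (ans, aset) by
            simp [pvGStep, hsm, hc1, hc2]]
          apply ih _ _ _ _ hLT hmpw hapw hmsub' hmsup' (fun x hx => hasub x (ham x hx))
          · intro x hx
            rcases hasup x hx with h | h
            · by_cases hge : s - 1 ≤ x
              · left; exact hamem x h hge
              · right; intro s' hs'; have := hsT s' hs'; omega
            · right; intro s' hs'; exact h s' (by simp [hs'])
          · exact fun s' hs' => hnot s' (by simp [hs'])

-- ===== VERDICT (by name: the statement is the Claim_ definition above) =====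
theorem solution_spec : Claim_equal_solution := by
  unfold Claim_equal_solution
  intro n lost reserve _ hpre
  obtain ⟨hdom, hal⟩ := hpre
  unfold Spec_solution solution solution_alt
  simp only []
  set L := PySem.List.sorted lost (fun x => x) with hLdef
  have hLmem : ∀ x : Int, x ∈ L ↔ x ∈ lost := fun x =>
    PySem.List.mem_sorted lost (fun x => x) false x
  set d0 : PySem.Dict Int Int :=
    reserve.foldl (fun d r => d.insert r 0) PySem.Dict.empty with hd0def
  set v0 : List Bool := List.replicate (n + 1).toNat false with hv0def
  have hd0 : ∀ j : Int, (d0.get? j).isSome = decide (j ∈ reserve) := by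
    intro j
    rw [hd0def, pv_isSome_foldl_insert]
    simp [PySem.Dict.get?_empty]
  obtain ⟨h11, h12, h13, h14⟩ := pv_phase1 L (n - PySem.List.len lost) d0 v0
  set s1 := L.foldl solAStep1 (n - PySem.List.len lost, d0, v0) with hs1def
  set spares0 : PySem.Set Int := PySem.Set.ofList reserve with hsp0def
  have hc0 : ∀ j : Int, spares0.contains j = decide (j ∈ reserve) :=
    fun j => pv_contains_ofList reserve j
  set matched : PySem.Set Int :=
    PySem.Set.ofList (L.filter (fun x => spares0.contains x)) with hmdef
  have hsp0mem : ∀ j : Int, j ∈ spares0 ↔ j ∈ reserve := fun j =>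
    PySem.Set.mem_ofList reserve j
  have hmc : ∀ s : Int, matched.contains s = (decide (s ∈ L) && decide (s ∈ reserve)) := by
    intro s
    rw [hmdef, pv_contains_ofList]
    by_cases h1 : s ∈ L <;> by_cases h2 : s ∈ reserve <;>
      simp [List.mem_filter, h1, h2, PySem.Set.contains, hsp0mem s]
  have hmmem : ∀ s : Int, s ∈ matched ↔ (s ∈ L ∧ s ∈ reserve) := by
    intro s
    have := hmc s
    constructor
    · intro hs
      have hcon : matched.contains s = true := by simpa [PySem.Set.contains] using hs
      rw [this] at hcon
      simp at hcon
      exact hcon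
    · intro hs
      have : matched.contains s = true := by rw [this]; simp [hs.1, hs.2]
      simpa [PySem.Set.contains] using this
  -- B-side structures
  obtain ⟨S, hSdef⟩ : ∃ S, S = PySem.List.sorted spares0 (fun x => x) := ⟨_, rfl⟩
  have hSpw : List.Pairwise (· < ·) S := by
    rw [hSdef, hsp0def]
    exact PySem.List.sorted_ofList_pairwise_lt reserve
  have hSmem : ∀ x : Int, x ∈ S ↔ x ∈ reserve := by
    intro x
    rw [hSdef, PySem.List.mem_sorted]
    exact hsp0mem x
  have hLpw : List.Pairwise (· ≤ ·) L := by
    rw [hLdef]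
    simpa using PySem.List.sorted_pairwise lost (fun x => x)
  have hinter := pv_inter_spec L S hLpw hSpw
  obtain ⟨ml, hmldef⟩ : ∃ ml, ml = S.filter (fun t => decide (t ∈ L)) := ⟨_, rfl⟩
  obtain ⟨al, haldef⟩ : ∃ al, al = S.filter (fun t => !decide (t ∈ L)) := ⟨_, rfl⟩
  have hmlpw : List.Pairwise (· < ·) ml := by rw [hmldef]; exact hSpw.filter _
  have halpw : List.Pairwise (· < ·) al := by rw [haldef]; exact hSpw.filter _
  have hmlmem : ∀ x : Int, x ∈ ml ↔ (x ∈ L ∧ x ∈ reserve) := by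
    intro x
    rw [hmldef]
    simp [List.mem_filter, hSmem x, and_comm]
  have halmem : ∀ x : Int, x ∈ al ↔ (x ∈ reserve ∧ x ∉ L) := by
    intro x
    rw [haldef]
    simp [List.mem_filter, hSmem x]
  -- the two initial answers agree
  have hfiltereq : L.filter (fun x => (d0.get? x).isSome)
      = L.filter (fun x => spares0.contains x) := by
    apply List.filter_congr
    intro x _
    rw [hd0 x, hc0 x]
  have hSnodup : S.Nodup := by
    rw [hSdef]
    refine ((PySem.List.sorted_perm spares0 (fun x => x) false).nodup_iff).mpr ?_
    rw [hsp0def]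
    exact PySem.Set.nodup_ofList reserve
  have hmlnodup : ml.Nodup := by rw [hmldef]; exact hSnodup.filter _
  have hcount : matched.length = ml.length := by
    rw [hmdef, pv_len_ofList, ← List.toFinset_card_of_nodup hmlnodup]
    congr 1
    ext z
    simp only [List.mem_toFinset, List.mem_filter, hmlmem z]
    constructor
    · rintro ⟨h1, h2⟩
      refine ⟨h1, ?_⟩
      have : spares0.contains z = true := h2
      rw [hc0 z] at this
      simpa using this
    · rintro ⟨h1, h2⟩
      refine ⟨h1, ?_⟩
      rw [hc0 z]
      simpa using h2
  -- the visit list reads as membership in `matched` on every element of L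
  have hvlen : (s1.2.2).length = (n + 1).toNat := by
    rw [h13, hv0def]
    simp
  have hvis : ∀ s ∈ L, PySem.List.pyGetD s1.2.2 s false = matched.contains s := by
    intro s hs
    have hsl : s ∈ lost := (hLmem s).mp hs
    rw [hmc s]
    simp only [hs, decide_true, Bool.true_and]
    cases hidx : PySem.List.pyIdx? (n + 1).toNat s with
    | none =>
      have hlhs : PySem.List.pyGetD s1.2.2 s false = false := by
        unfold PySem.List.pyGetD PySem.List.pyGet?
        rw [hvlen, hidx]
        rfl
      rw [hlhs]
      have hnr : s ∉ reserve := by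
        intro hres
        rcases hdom s hsl with hin | hiso
        · exact absurd hidx (by
            intro h
            exact ((pv_pyIdx?_eq_none_iff n s).mp h) hin)
        · exact hiso.1 hres
      simp [hnr]
    | some t =>
      have ht : t < (n + 1).toNat := by
        rcases (pv_pyIdx?_eq_some_iff (n + 1).toNat s t).mp hidx with ⟨_, h2, h3⟩ | ⟨h1, h2, h3⟩ <;>
          omega
      have hlhs : PySem.List.pyGetD s1.2.2 s false = (s1.2.2).getD t false := by
        unfold PySem.List.pyGetD PySem.List.pyGet?
        rw [hvlen, hidx]
        simp [List.getD_eq_getElem?_getD]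
      rw [hlhs, h14 t]
      have hrep : v0.getD t false = false := by
        rw [hv0def]; exact pv_getD_replicate_false _ _
      rw [hrep, Bool.false_or]
      have hvl : v0.length = (n + 1).toNat := by rw [hv0def]; simp
      by_cases hres : s ∈ reserve
      · simp only [hres, decide_true]
        rw [List.any_eq_true]
        exact ⟨s, hs, by simp [hd0 s, hres, hvl, hidx]⟩
      · simp only [hres, decide_false]
        rw [List.any_eq_false]
        intro m hm
        simp only [hvl, Bool.and_eq_true, decide_eq_true_eq]
        rintro ⟨hmd, hmidx⟩
        have hmres : m ∈ reserve := by
          have := hd0 m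
          rw [hmd] at this
          exact of_decide_eq_true this.symm
        have hmne : m ≠ s := fun h => hres (h ▸ hmres)
        have hNpos : (0 : Int) < ((n + 1).toNat : Int) := by
          rcases (pv_pyIdx?_eq_some_iff (n + 1).toNat s t).mp hidx with ⟨b1, b2, b3⟩ | ⟨b1, b2, b3⟩ <;>
            omega
        have hn0 : 0 ≤ n := by omega
        have hcase : m = s ∨ m - s = n + 1 ∨ s - m = n + 1 := by
          rcases (pv_pyIdx?_eq_some_iff (n + 1).toNat m t).mp hmidx with ⟨a1, a2, a3⟩ | ⟨a1, a2, a3⟩ <;>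
            rcases (pv_pyIdx?_eq_some_iff (n + 1).toNat s t).mp hidx with ⟨b1, b2, b3⟩ | ⟨b1, b2, b3⟩ <;>
            omega
        rcases hcase with h | h | h
        · exact hmne h
        · exact hal hn0 m ((hLmem m).mp hm) s hsl hmne (Int.emod_eq_zero_of_dvd ⟨1, by omega⟩)
        · exact hal hn0 m ((hLmem m).mp hm) s hsl hmne (Int.emod_eq_zero_of_dvd ⟨-1, by omega⟩)
  -- the dict after the first loop tracks the abstract spare set
  have hrel : ∀ j : Int, (s1.2.1.get? j).isSome
      = PySem.Set.contains (PySem.Set.diff spares0 matched) j := by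
    intro j
    rw [h12 j, hd0 j, pv_contains_diff, hc0 j, hmc j]
    by_cases h1 : j ∈ reserve <;> by_cases h2 : j ∈ L <;> simp [h1, h2]
  have hdiffmem : ∀ x : Int, x ∈ PySem.Set.diff spares0 matched ↔ (x ∈ reserve ∧ x ∉ L) := by
    intro x
    have hcon := pv_contains_diff spares0 matched x
    rw [hc0 x, hmc x] at hcon
    constructor
    · intro hx
      have : (PySem.Set.diff spares0 matched).contains x = true := by
        simpa [PySem.Set.contains] using hx
      rw [hcon] at this
      by_cases h1 : x ∈ reserve <;> by_cases h2 : x ∈ L <;> simp_all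
    · intro hx
      have : (PySem.Set.diff spares0 matched).contains x = true := by
        rw [hcon]; simp [hx.1, hx.2]
      simpa [PySem.Set.contains] using this
  -- A's answer after phase 1
  have hans : s1.1 = n - PySem.List.len lost + (ml.length : Int) := by
    rw [h11, hfiltereq, ← hmdef, hcount]
  -- put the pieces together
  rw [← hSdef, hinter]
  simp only []
  rw [← hmldef, ← haldef]
  have hstart : n - PySem.List.len lost + PySem.List.len ml = s1.1 := by
    rw [hans]
    rfl
  rw [hstart]
  have hA := pv_phase2 s1.2.2 matched L s1.1 s1.2.1 (PySem.Set.diff spares0 matched) hvis hrel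
  have hB := pv_phase3 matched L s1.1 ml al (PySem.Set.diff spares0 matched)
    hLpw hmlpw halpw
    (fun x hx => (hmmem x).mpr ((hmlmem x).mp hx))
    (fun x hx => Or.inl ((hmlmem x).mpr ((hmmem x).mp hx)))
    (fun x hx => (hdiffmem x).mpr ((halmem x).mp hx))
    (fun x hx => Or.inl ((halmem x).mpr ((hdiffmem x).mp hx)))
    (fun s hs hmem => ((hdiffmem s).mp hmem).2 hs)
  rw [hA]
  exact hB.symm
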